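-- pv_equiv track=rewrite | github.com/MaciekChudek/word_proximity_counter | characterLocatorFunctions.py | get_nearest_positions
-- ===== SOURCE A (Python) =====
-- def get_nearest_positions(focal_pos,char_positions): #IMPORANT NOTE: relies on monotonic ordering, which is assured by how we create the lists
-- 	if len(char_positions) == 0:
-- 		return (-1,-1) #a special case, no characters
-- 	for i in range(len(char_positions)):
-- 		if (char_positions[i] > focal_pos): #we've hit the first instance of an ``other character'' that occurs after the focal postion
-- 			if i == 0: #a specail case, there are no instance before
-- 				return (-1, char_positions[i]- focal_pos)
-- 			else:
-- 				return (focal_pos - char_positions[i-1], char_positions[i] - focal_pos) #otherwise we count the distances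
-- 	return(focal_pos - char_positions[len(char_positions)-1], -1) #special case, the loop ended so there werne't any instances after the focal postion
-- ===== SOURCE B (Python) =====
-- def get_nearest_positions(focal_pos, char_positions):
--     # binary search (hand-rolled bisect_right) for the first position > focal_pos
--     n = len(char_positions)
--     lo, hi = 0, n
--     while lo < hi:
--         mid = (lo + hi) // 2
--         if char_positions[mid] <= focal_pos:
--             lo = mid + 1
--         else:
--             hi = mid
--     before = -1 if lo == 0 else focal_pos - char_positions[lo - 1]
--     after = -1 if lo == n else char_positions[lo] - focal_pos
--     return (before, after)
-- ===== Notes on version B (the rewrite author's own statement) =====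
-- stated objective: faster
-- what changed: replaces A's left-to-right linear scan for the first position greater than focal_pos by a hand-rolled bisect_right binary search; Pre_ excludes lists where an element > focal_pos is followed by one <= focal_pos (impossible on the nondecreasing input A's comment documents: it 'relies on monotonic ordering'), because there A's linear-scan crossing point is accidental and binary search legitimately differs
-- outside the precondition, e.g. on get_nearest_positions(5, [10, 0]): A returns (-1, 5), B returns (5, -1)
import Mathlib
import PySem

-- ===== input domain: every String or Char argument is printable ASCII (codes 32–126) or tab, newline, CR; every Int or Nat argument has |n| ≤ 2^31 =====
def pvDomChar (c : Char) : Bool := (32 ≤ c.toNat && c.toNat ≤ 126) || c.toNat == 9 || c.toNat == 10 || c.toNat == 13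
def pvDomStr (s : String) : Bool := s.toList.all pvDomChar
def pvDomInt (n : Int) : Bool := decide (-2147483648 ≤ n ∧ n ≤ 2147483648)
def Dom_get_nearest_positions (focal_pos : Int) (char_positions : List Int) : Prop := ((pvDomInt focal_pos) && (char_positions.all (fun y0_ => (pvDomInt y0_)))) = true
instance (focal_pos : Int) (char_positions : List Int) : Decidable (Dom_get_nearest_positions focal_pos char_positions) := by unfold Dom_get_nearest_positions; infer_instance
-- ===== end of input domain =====

-- B replaces A's linear scan by a bisect_right-style binary search (asymptotically faster on the
-- documented sorted input domain); equivalence of the returned value is proved on nondecreasing lists.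

-- ===== PORT A =====
-- A's for-loop over range(len(char_positions)), as recursion on the index i; the extra fuel
-- argument (always ≥ remaining iterations at every call) only makes the recursion structural.
def pvA_loop (f : Int) (cp : List Int) : Nat → Nat → List Int
  | 0, _ => [f - cp.getD (cp.length - 1) 0, -1]
  | fuel + 1, i =>
    if i < cp.length then
      if f < cp.getD i 0 then
        if i = 0 then [-1, cp.getD i 0 - f]
        else [f - cp.getD (i - 1) 0, cp.getD i 0 - f]
      else pvA_loop f cp fuel (i + 1)
    else [f - cp.getD (cp.length - 1) 0, -1]

def get_nearest_positions (focal_pos : Int) (char_positions : List Int) : List Int :=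
  if char_positions.length = 0 then [-1, -1]
  else pvA_loop focal_pos char_positions (char_positions.length + 1) 0

-- ===== PORT B =====
-- Source B's while-loop (hand-rolled bisect_right) as recursion on (lo, hi); the fuel argument
-- (always ≥ hi - lo at every call) only makes the recursion structural.
def pvB_search (f : Int) (cp : List Int) : Nat → Nat → Nat → Nat
  | 0, lo, _ => lo
  | fuel + 1, lo, hi =>
    if lo < hi then
      let mid := (lo + hi) / 2
      if cp.getD mid 0 ≤ f then pvB_search f cp fuel (mid + 1) hi
      else pvB_search f cp fuel lo mid
    else lo

def get_nearest_positions_alt (focal_pos : Int) (char_positions : List Int) : List Int :=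
  let n := char_positions.length
  let lo := pvB_search focal_pos char_positions (n + 1) 0 n
  let before : Int := if lo = 0 then -1 else focal_pos - char_positions.getD (lo - 1) 0
  let after : Int := if lo = n then -1 else char_positions.getD lo 0 - focal_pos
  [before, after]

-- ===== PRECONDITION & SPEC =====
-- Pre_ excludes lists in which some element > focal_pos is followed by an element ≤ focal_pos
-- (only possible for input that is not nondecreasing, which A's own comment rules out: it 'relies on
-- monotonic ordering'); there A still returns a value, but its linear-scan choice of crossing point
-- is accidental and a binary search legitimately differs.
def Pre_get_nearest_positions (focal_pos : Int) (char_positions : List Int) : Prop :=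
  ∀ i < char_positions.length, ∀ j < char_positions.length, i ≤ j →
    focal_pos < char_positions.getD i 0 → focal_pos < char_positions.getD j 0
instance (focal_pos : Int) (char_positions : List Int) : Decidable (Pre_get_nearest_positions focal_pos char_positions) := by unfold Pre_get_nearest_positions; infer_instance

def pvWitness_get_nearest_positions : Int × List Int := (3, [1, 2, 5])

def Spec_get_nearest_positions (focal_pos : Int) (char_positions : List Int) (out : List Int) : Prop := out = get_nearest_positions_alt focal_pos char_positions
instance (focal_pos : Int) (char_positions : List Int) (out : List Int) : Decidable (Spec_get_nearest_positions focal_pos char_positions out) := by unfold Spec_get_nearest_positions; infer_instance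

-- ===== CLAIM (what is proved, stated in full; the proofs are below) =====
def Claim_equal_get_nearest_positions : Prop := ∀ (focal_pos : Int) (char_positions : List Int), Dom_get_nearest_positions focal_pos char_positions → Pre_get_nearest_positions focal_pos char_positions → Spec_get_nearest_positions focal_pos char_positions (get_nearest_positions focal_pos char_positions)

-- ===== LEMMAS AND PROOFS =====

-- Pre_ says exactly that the predicate "f < element" is upward closed along the index order.
theorem pv_mono {f : Int} {cp : List Int}
    (hs : ∀ i < cp.length, ∀ j < cp.length, i ≤ j → f < cp.getD i 0 → f < cp.getD j 0)
    {i j : Nat} (hij : i ≤ j) (hj : j < cp.length) (hi' : i < cp.length)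
    (hi : f < cp.getD i 0) : f < cp.getD j 0 :=
  hs i hi' j hj hij hi

-- The binary search returns the crossing index: everything strictly below it is ≤ f,
-- everything from it on (within the list) is > f.
theorem pvB_search_spec (f : Int) (cp : List Int)
    (hs : ∀ i < cp.length, ∀ j < cp.length, i ≤ j → f < cp.getD i 0 → f < cp.getD j 0) :
    ∀ fuel lo hi, hi - lo ≤ fuel → lo ≤ hi → hi ≤ cp.length →
    (∀ j < lo, ¬ f < cp.getD j 0) →
    (∀ j, hi ≤ j → j < cp.length → f < cp.getD j 0) →
    (∀ j < pvB_search f cp fuel lo hi, ¬ f < cp.getD j 0) ∧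
    (∀ j, pvB_search f cp fuel lo hi ≤ j → j < cp.length → f < cp.getD j 0) ∧
    pvB_search f cp fuel lo hi ≤ cp.length := by
  intro fuel
  induction fuel with
  | zero =>
    intro lo hi hd hlh hhn hlow hhigh
    rw [pvB_search]
    exact ⟨hlow, fun j hj hjn => hhigh j (by omega) hjn, by omega⟩
  | succ d ih =>
    intro lo hi hd hlh hhn hlow hhigh
    rw [pvB_search]
    by_cases h : lo < hi
    · rw [if_pos h]
      have hmid1 : lo ≤ (lo + hi) / 2 := by omega
      have hmid2 : (lo + hi) / 2 < hi := by omega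
      by_cases hc : cp.getD ((lo + hi) / 2) 0 ≤ f
      · simp only [if_pos hc]
        apply ih ((lo + hi) / 2 + 1) hi (by omega) (by omega) hhn
        · intro j hj
          rcases Nat.lt_or_ge j lo with h' | h'
          · exact hlow j h'
          · intro hPj
            exact absurd (pv_mono hs (i := j) (j := (lo + hi) / 2) (by omega) (by omega) (by omega) hPj)
              (not_lt.mpr hc)
        · exact hhigh
      · simp only [if_neg hc]
        apply ih lo ((lo + hi) / 2) (by omega) (by omega) (by omega) hlow
        intro j hj hjn
        exact pv_mono hs (i := (lo + hi) / 2) hj hjn (by omega) (not_le.mp hc)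
    · rw [if_neg h]
      exact ⟨hlow, fun j hj hjn => hhigh j (by omega) hjn, by omega⟩

-- A's loop when no remaining element exceeds f.
theorem pvA_loop_none (f : Int) (cp : List Int) :
    ∀ fuel i, cp.length - i ≤ fuel →
    (∀ j, i ≤ j → j < cp.length → ¬ f < cp.getD j 0) →
    pvA_loop f cp fuel i = [f - cp.getD (cp.length - 1) 0, -1] := by
  intro fuel
  induction fuel with
  | zero =>
    intro i hd h
    rw [pvA_loop]
  | succ d ih =>
    intro i hd h
    rw [pvA_loop]
    by_cases hi : i < cp.length
    · rw [if_pos hi, if_neg (h i le_rfl hi)]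
      exact ih (i + 1) (by omega) (fun j hj hjn => h j (by omega) hjn)
    · rw [if_neg hi]

-- A's loop when c is the first index ≥ i whose element exceeds f.
theorem pvA_loop_found (f : Int) (cp : List Int) :
    ∀ fuel i c, c - i < fuel → i ≤ c → c < cp.length → f < cp.getD c 0 →
    (∀ j, i ≤ j → j < c → ¬ f < cp.getD j 0) →
    pvA_loop f cp fuel i =
      (if c = 0 then [-1, cp.getD c 0 - f] else [f - cp.getD (c - 1) 0, cp.getD c 0 - f]) := by
  intro fuel
  induction fuel with
  | zero =>
    intro i c hd hic hcn hPc h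
    omega
  | succ d ih =>
    intro i c hd hic hcn hPc h
    rcases Nat.eq_or_lt_of_le hic with rfl | hlt
    · rw [pvA_loop, if_pos hcn, if_pos hPc]
    · rw [pvA_loop, if_pos (by omega), if_neg (h i le_rfl hlt)]
      exact ih (i + 1) c (by omega) (by omega) hcn hPc (fun j hj hjc => h j (by omega) hjc)

-- ===== VERDICT (by name: the statement is the Claim_ definition above) =====
theorem get_nearest_positions_spec : Claim_equal_get_nearest_positions := by
  intro f cp _ hPre
  unfold Spec_get_nearest_positions
  have hs : ∀ i < cp.length, ∀ j < cp.length, i ≤ j → f < cp.getD i 0 → f < cp.getD j 0 := hPre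
  obtain ⟨h1, h2, h3⟩ := pvB_search_spec f cp hs (cp.length + 1) 0 cp.length (by omega) (by omega)
    le_rfl (by omega) (by intro j hj hjn; omega)
  have halt : get_nearest_positions_alt f cp =
      [if pvB_search f cp (cp.length + 1) 0 cp.length = 0 then (-1 : Int)
         else f - cp.getD (pvB_search f cp (cp.length + 1) 0 cp.length - 1) 0,
       if pvB_search f cp (cp.length + 1) 0 cp.length = cp.length then (-1 : Int)
         else cp.getD (pvB_search f cp (cp.length + 1) 0 cp.length) 0 - f] := rfl
  rw [halt]
  set r := pvB_search f cp (cp.length + 1) 0 cp.length with hr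
  unfold get_nearest_positions
  by_cases hn : cp.length = 0
  · rw [if_pos hn, if_pos (show r = 0 by omega), if_pos (show r = cp.length by omega)]
  · rw [if_neg hn]
    rcases Nat.eq_or_lt_of_le h3 with hrn | hrn
    · rw [pvA_loop_none f cp (cp.length + 1) 0 (by omega) (fun j _ hjn => h1 j (by omega)),
        if_neg (show ¬ r = 0 by omega), if_pos hrn, hrn]
    · have hPr : f < cp.getD r 0 := h2 r le_rfl hrn
      rw [pvA_loop_found f cp (cp.length + 1) 0 r (by omega) (by omega) hrn hPr
        (fun j _ hjc => h1 j hjc)]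
      by_cases hr0 : r = 0
      · rw [if_pos hr0, if_neg (show ¬ r = cp.length by omega), if_pos hr0]
      · rw [if_neg hr0, if_neg (show ¬ r = cp.length by omega), if_neg hr0]
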